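-- pv_equiv track=rewrite | github.com/joebu23/WxData | textHelper.py | getLinesWithPertinentData
-- ===== SOURCE A (Python) =====
-- def getLinesWithPertinentData(data):
--     if data != '':
--         counter = 0
--         dateCounter = 0
--         cityCounter = 0
--
--         for d in data:
--             if d.strip()[:4] == 'FCST':
--                 dateCounter = counter
--
--             if d.strip() == 'Grand Rapids':
--                 cityCounter = counter
--
--             counter = counter + 1
--
--         return data[dateCounter+2], data[cityCounter+1], data[cityCounter+2], data[cityCounter+3]
-- ===== SOURCE B (Python) =====
-- def getLinesWithPertinentData(data):
--     if data != '':
--         n = len(data)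
--
--         dateCounter = 0
--         for i in range(n - 1, -1, -1):
--             if data[i].strip()[:4] == 'FCST':
--                 dateCounter = i
--                 break
--
--         cityCounter = 0
--         for i in range(n - 1, -1, -1):
--             if data[i].strip() == 'Grand Rapids':
--                 cityCounter = i
--                 break
--
--         return data[dateCounter+2], data[cityCounter+1], data[cityCounter+2], data[cityCounter+3]
-- ===== Notes on version B (the rewrite author's own statement) =====
-- stated objective: alternative
-- what changed: Replaces A's single forward pass that keeps overwriting both marker indices with two independent backward scans that each stop at the first (i.e. last) matching line, so lines after the last markers are never tested for either marker.
import Mathlib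
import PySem

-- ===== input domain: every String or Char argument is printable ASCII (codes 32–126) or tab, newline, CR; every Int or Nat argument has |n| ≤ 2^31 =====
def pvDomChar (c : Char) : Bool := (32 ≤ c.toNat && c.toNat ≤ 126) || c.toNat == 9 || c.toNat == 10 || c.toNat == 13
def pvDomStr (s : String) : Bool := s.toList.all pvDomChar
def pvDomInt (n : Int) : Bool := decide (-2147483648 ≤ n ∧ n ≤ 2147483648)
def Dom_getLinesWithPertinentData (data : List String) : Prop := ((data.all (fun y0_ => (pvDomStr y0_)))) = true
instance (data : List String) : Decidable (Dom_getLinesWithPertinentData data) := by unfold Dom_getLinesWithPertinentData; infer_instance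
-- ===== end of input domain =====

-- B replaces A's forward pass that keeps overwriting both marker indices with two
-- independent backward scans each stopping at the first (= last) matching line;
-- return value only, identical on Pre_ (where A's four list indexings are in range).

-- d.strip()[:4] == 'FCST'
def pvIsFcst (d : String) : Bool := PySem.Str.slice (PySem.Str.strip d) none (some 4) == "FCST"

-- d.strip() == 'Grand Rapids'
def pvIsCity (d : String) : Bool := PySem.Str.strip d == "Grand Rapids"

-- ===== PORT A =====
-- A's forward loop: state (counter, dateCounter, cityCounter); `if data != ''` is
-- always True for a Python list, so it is dropped. data[i] with i in range (Pre_)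
-- is List.getD (default never used inside Pre_).
def pvStepA (s : Nat × Nat × Nat) (d : String) : Nat × Nat × Nat :=
  (s.1 + 1,
   (if pvIsFcst d then s.1 else s.2.1),
   (if pvIsCity d then s.1 else s.2.2))

def getLinesWithPertinentData (data : List String) : String × String × String × String :=
  let s := data.foldl pvStepA (0, 0, 0)
  (data.getD (s.2.1 + 2) "", data.getD (s.2.2 + 1) "", data.getD (s.2.2 + 2) "", data.getD (s.2.2 + 3) "")

-- ===== PORT B =====
-- B's backward scan `for i in range(n-1, -1, -1): … break`: pvSearchDown data p i
-- scans indices i-1, i-2, …, 0, returning the first index whose line satisfies p,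
-- else 0 (the loop's initial value).
def pvSearchDown (data : List String) (p : String → Bool) : Nat → Nat
  | 0 => 0
  | i + 1 => if p (data.getD i "") then i else pvSearchDown data p i

def getLinesWithPertinentData_alt (data : List String) : String × String × String × String :=
  let dateCounter := pvSearchDown data pvIsFcst data.length
  let cityCounter := pvSearchDown data pvIsCity data.length
  (data.getD (dateCounter + 2) "", data.getD (cityCounter + 1) "", data.getD (cityCounter + 2) "", data.getD (cityCounter + 3) "")

-- ===== PRECONDITION & SPEC =====
-- Pre_ excludes exactly the inputs on which Python A raises IndexError: the four
-- accesses data[dateCounter+2], data[cityCounter+1..3] must be in range, where the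
-- counters are the last marker positions (0 if the marker is absent).
def pvLastMarker (p : String → Bool) (xs : List String) : Nat :=
  if xs.any p then xs.length - 1 - xs.reverse.findIdx p else 0

def Pre_getLinesWithPertinentData (data : List String) : Prop :=
  pvLastMarker pvIsFcst data + 2 < data.length ∧ pvLastMarker pvIsCity data + 3 < data.length

instance (data : List String) : Decidable (Pre_getLinesWithPertinentData data) := by
  unfold Pre_getLinesWithPertinentData; infer_instance

def pvWitness_getLinesWithPertinentData : List String :=
  ["FCST DATA", "Grand Rapids", "a", "b", "c"]

def Spec_getLinesWithPertinentData (data : List String) (out : String × String × String × String) : Prop := out = getLinesWithPertinentData_alt data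
instance (data : List String) (out : String × String × String × String) : Decidable (Spec_getLinesWithPertinentData data out) := by unfold Spec_getLinesWithPertinentData; infer_instance

-- ===== CLAIM (what is proved, stated in full; the proofs are below) =====
def Claim_equal_getLinesWithPertinentData : Prop := ∀ (data : List String), Dom_getLinesWithPertinentData data → Pre_getLinesWithPertinentData data → Spec_getLinesWithPertinentData data (getLinesWithPertinentData data)

-- ===== LEMMAS AND PROOFS =====

-- the counter component of A's fold counts the elements seen
theorem pvFoldA_fst (xs : List String) (s : Nat × Nat × Nat) :
    (xs.foldl pvStepA s).1 = s.1 + xs.length := by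
  induction xs generalizing s with
  | nil => simp
  | cons x xs ih => simp [pvStepA, ih]; omega

-- pvSearchDown only looks at indices < i, so appending past them changes nothing
theorem pvSearchDown_append (xs : List String) (x : String) (p : String → Bool)
    (i : Nat) (h : i ≤ xs.length) :
    pvSearchDown (xs ++ [x]) p i = pvSearchDown xs p i := by
  induction i with
  | zero => rfl
  | succ i ih =>
    have hi : i < xs.length := by omega
    simp [pvSearchDown, List.getD, List.getElem?_append_left hi, ih (by omega)]

-- main invariant: A's two marker counters equal B's backward-search results
theorem pvCounters_eq (data : List String) :
    (data.foldl pvStepA (0, 0, 0)).2.1 = pvSearchDown data pvIsFcst data.length ∧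
    (data.foldl pvStepA (0, 0, 0)).2.2 = pvSearchDown data pvIsCity data.length := by
  induction data using List.reverseRecOn with
  | nil => simp [pvSearchDown]
  | append_singleton xs x ih =>
    have hc := pvFoldA_fst xs (0, 0, 0)
    have hlast : (xs ++ [x]).getD xs.length "" = x := by
      simp [List.getD]
    constructor <;>
    · simp only [List.foldl_append, List.foldl_cons, List.foldl_nil, pvStepA,
        List.length_append, List.length_singleton, pvSearchDown, hlast,
        pvSearchDown_append xs x _ xs.length (le_refl _)]
      rw [hc] at *
      simp only [Nat.zero_add]
      split <;> simp [ih.1, ih.2]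

-- ===== VERDICT (by name: the statement is the Claim_ definition above) =====
theorem getLinesWithPertinentData_spec : Claim_equal_getLinesWithPertinentData := by
  intro data _ _
  unfold Spec_getLinesWithPertinentData getLinesWithPertinentData getLinesWithPertinentData_alt
  have h := pvCounters_eq data
  simp only [h.1, h.2]
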